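-- pv_equiv track=rewrite | github.com/Michaelhuazhang/code_offer | 左传云算法刷题/高频算法刷题/problem_02_subArray.py | maxlengthAweSome
-- ===== SOURCE A (Python) =====
-- def maxlengthAweSome(array, k):
-- 	if not array or len(array) == 0:
-- 		return 0
-- 	sums = [0 for i in range(len(array))]
-- 	ends = {}
-- 	sums[len(array) - 1] = array[len(array) - 1]
-- 	ends[len(array) - 1] = len(array) - 1
-- 	for i in range(len(array)-2, -1, -1):
-- 		if sums[i+1] < 0:
-- 			sums[i] = array[i] + sums[i+1]
-- 			ends[i] = ends[i+1]
-- 		else: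
-- 			sums[i] = array[i]
-- 			ends[i] = i
-- 	end = 0
-- 	sumarray = 0
-- 	res = 0
-- 	for i  in range(len(array)):
-- 		while end < len(array) and sumarray + sums[end] <= k:
-- 			sumarray += sums[end]
-- 			end = ends[end] + 1
-- 		sumarray -= array[i] if end > i else 0
-- 		res = max(res, end - i)
-- 		end = max(end, i+1)
-- 	return res
-- ===== SOURCE B (Python) =====
-- def maxlengthAweSome(array, k):
--     best = 0
--     for i in range(len(array)):
--         s = 0
--         for j in range(i, len(array)):
--             s += array[j]
--             if s <= k:
--                 best = max(best, j - i + 1)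
--     return best
-- ===== Notes on version B (the rewrite author's own statement) =====
-- stated objective: simpler
-- what changed: Replaces A's O(n) block-decomposition (min-prefix sums/ends tables plus a jumping sliding window) with a plain brute-force double loop that accumulates each subarray sum and tracks the best length.
import Mathlib
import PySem

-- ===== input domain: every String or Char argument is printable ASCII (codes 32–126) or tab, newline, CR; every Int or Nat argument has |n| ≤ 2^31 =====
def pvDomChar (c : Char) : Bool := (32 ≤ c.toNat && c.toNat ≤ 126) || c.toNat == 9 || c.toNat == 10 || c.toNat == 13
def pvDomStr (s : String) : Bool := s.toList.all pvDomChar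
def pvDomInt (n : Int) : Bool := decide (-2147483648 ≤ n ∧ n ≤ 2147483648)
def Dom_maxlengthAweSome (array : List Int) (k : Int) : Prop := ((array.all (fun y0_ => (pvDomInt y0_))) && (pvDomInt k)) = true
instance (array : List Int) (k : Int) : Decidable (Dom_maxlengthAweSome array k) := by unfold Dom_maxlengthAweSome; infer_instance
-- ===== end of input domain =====

-- B replaces A's O(n) min-prefix-block sliding-window algorithm with a plain brute-force
-- double loop over all subarrays (simpler, not faster).


-- ===== PORT A =====
-- Phase-1 loop `for i in range(len(array)-2, -1, -1)`: structural recursion that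
-- processes index c, then c-1, …, 0 (call with c = len-1 so the first index is len-2).
-- All list indices touched are provably in range, so plain `List.getD`/`List.set` is
-- exact for Python's indexing/assignment here; the dict keys are the nonnegative ints
-- 0..len-1, represented as Nat.
def pvAinit (array : List Int) : Nat → (List Int × PySem.Dict Nat Nat) → (List Int × PySem.Dict Nat Nat)
  | 0, st => st
  | c+1, (sums, ends) =>
      pvAinit array c
        (if sums.getD (c + 1) 0 < 0 then
          (sums.set c (array.getD c 0 + sums.getD (c + 1) 0),
           PySem.Dict.insert ends c (PySem.Dict.getD ends (c + 1) 0))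
         else
          (sums.set c (array.getD c 0), PySem.Dict.insert ends c c))

-- The inner `while` loop of A; `end` strictly increases on every real run, so fuel
-- `len+1` (supplied by the caller) never runs out: the guard only makes it total.
def pvAwhile (array : List Int) (k : Int) (sums : List Int) (ends : PySem.Dict Nat Nat) :
    Nat → Nat → Int → Nat × Int
  | 0, e, s => (e, s)
  | fuel+1, e, s =>
      if e < array.length ∧ s + sums.getD e 0 ≤ k then
        pvAwhile array k sums ends fuel (PySem.Dict.getD ends e 0 + 1) (s + sums.getD e 0)
      else (e, s)

def maxlengthAweSome (array : List Int) (k : Int) : Int :=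
  if array.length = 0 then 0
  else
    let n := array.length
    let sums0 := (List.range n).map (fun _ => (0 : Int))
    let sums1 := sums0.set (n - 1) (array.getD (n - 1) 0)
    let ends1 : PySem.Dict Nat Nat := PySem.Dict.insert PySem.Dict.empty (n - 1) (n - 1)
    let st := pvAinit array (n - 1) (sums1, ends1)
    let sums := st.1
    let ends := st.2
    ((List.range n).foldl
      (fun (acc : Nat × Int × Int) (i : Nat) =>
        let es := pvAwhile array k sums ends (n + 1) acc.1 acc.2.1
        let sumarray := es.2 - (if i < es.1 then array.getD i 0 else 0)
        let res := max acc.2.2 ((es.1 : Int) - (i : Int))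
        (max es.1 (i + 1), sumarray, res))
      (0, 0, 0)).2.2

-- ===== PORT B =====
-- brute force: for each start i, accumulate the running sum over j and keep the best length
def maxlengthAweSome_alt (array : List Int) (k : Int) : Int :=
  (List.range array.length).foldl
    (fun best i =>
      ((List.range' i (array.length - i)).foldl
        (fun (p : Int × Int) j =>
          let s := p.1 + array.getD j 0
          (s, if s ≤ k then max p.2 ((j : Int) - (i : Int) + 1) else p.2))
        (0, best)).2)
    0

-- ===== PRECONDITION & SPEC =====
def Spec_maxlengthAweSome (array : List Int) (k : Int) (out : Int) : Prop := out = maxlengthAweSome_alt array k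
instance (array : List Int) (k : Int) (out : Int) : Decidable (Spec_maxlengthAweSome array k out) := by unfold Spec_maxlengthAweSome; infer_instance

-- ===== CLAIM (what is proved, stated in full; the proofs are below) =====
def Claim_equal_maxlengthAweSome : Prop := ∀ (array : List Int) (k : Int), Dom_maxlengthAweSome array k → Spec_maxlengthAweSome array k (maxlengthAweSome array k)

-- ===== LEMMAS AND PROOFS =====

-- prefix sums and subarray sums
def pvP (a : List Int) (m : Nat) : Int := (a.take m).sum
def pvS (a : List Int) (i j : Nat) : Int := pvP a j - pvP a i

-- the common specification value: the longest subarray a[i..j] with sum <= k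
def pvTgt (a : List Int) (k : Int) : Nat :=
  ((Finset.range a.length ×ˢ Finset.range a.length).filter
      (fun p => p.1 ≤ p.2 ∧ pvS a p.1 (p.2 + 1) ≤ k)).sup
    (fun p => p.2 + 1 - p.1)

-- the "minimal block" function behind A's phase 1: (pvG a i).1 is the minimal sum of a
-- prefix a[i..j] (j ≥ i), (pvG a i).2 the first j attaining it
def pvG (a : List Int) (i : Nat) : Int × Nat :=
  if _h : i + 1 < a.length then
    let p := pvG a (i + 1)
    if p.1 < 0 then (a.getD i 0 + p.1, p.2) else (a.getD i 0, i)
  else (a.getD i 0, i)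
termination_by a.length - i

theorem pvS_self (a : List Int) (i : Nat) : pvS a i i = 0 := by simp [pvS]

theorem pvS_trans (a : List Int) (i j l : Nat) : pvS a i j + pvS a j l = pvS a i l := by
  simp [pvS]

theorem pvP_succ (a : List Int) (j : Nat) (h : j < a.length) :
    pvP a (j + 1) = pvP a j + a.getD j 0 := by
  rw [pvP, pvP, List.take_add_one, List.sum_append, List.getD_eq_getElem?_getD,
    List.getElem?_eq_getElem h]
  simp

theorem pvS_succ (a : List Int) (i j : Nat) (h : j < a.length) :
    pvS a i (j + 1) = pvS a i j + a.getD j 0 := by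
  simp [pvS, pvP_succ a j h]; ring

theorem pvTgt_ge (a : List Int) (k : Int) (i j : Nat) (hij : i ≤ j) (hj : j < a.length)
    (hk : pvS a i (j + 1) ≤ k) : j + 1 - i ≤ pvTgt a k := by
  have hmem : (i, j) ∈ (Finset.range a.length ×ˢ Finset.range a.length).filter
      (fun p => p.1 ≤ p.2 ∧ pvS a p.1 (p.2 + 1) ≤ k) := by
    simp only [Finset.mem_filter, Finset.mem_product, Finset.mem_range]
    exact ⟨⟨lt_of_le_of_lt hij hj, hj⟩, hij, hk⟩
  exact Finset.le_sup (f := fun p : Nat × Nat => p.2 + 1 - p.1) hmem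

theorem pvTgt_ge' (a : List Int) (k : Int) (i j : Nat) (hij : i ≤ j) (hj : j < a.length)
    (hk : pvS a i (j + 1) ≤ k) : ((j : Int) + 1 - i) ≤ (pvTgt a k : Int) := by
  have := pvTgt_ge a k i j hij hj hk
  omega

theorem pvTgt_attained (a : List Int) (k : Int) :
    pvTgt a k = 0 ∨ ∃ i j, i ≤ j ∧ j < a.length ∧ pvS a i (j + 1) ≤ k ∧ pvTgt a k = j + 1 - i := by
  rcases Finset.eq_empty_or_nonempty ((Finset.range a.length ×ˢ Finset.range a.length).filter
      (fun p => p.1 ≤ p.2 ∧ pvS a p.1 (p.2 + 1) ≤ k)) with he | hne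
  · left; simp [pvTgt, he]
  · obtain ⟨p, hp, hsup⟩ := Finset.exists_mem_eq_sup _ hne (fun p : Nat × Nat => p.2 + 1 - p.1)
    simp only [Finset.mem_filter, Finset.mem_product, Finset.mem_range] at hp
    exact Or.inr ⟨p.1, p.2, hp.2.1, hp.1.2, hp.2.2, hsup⟩

-- generic fold-over-range invariant
theorem pvFoldlRangeInv {α : Type} (f : α → Nat → α) (Inv : Nat → α → Prop) :
    ∀ (n : Nat) (a0 : α), Inv 0 a0 → (∀ i x, i < n → Inv i x → Inv (i + 1) (f x i)) →
      Inv n ((List.range n).foldl f a0) := by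
  intro n
  induction n with
  | zero => intro a0 h0 _; simpa using h0
  | succ n ih =>
      intro a0 h0 hstep
      rw [List.range_succ, List.foldl_append]
      exact hstep n _ (Nat.lt_succ_self n)
        (ih a0 h0 (fun i x hi hx => hstep i x (Nat.lt_succ_of_lt hi) hx))

-- ===== B = pvTgt =====

-- named forms of the two fold bodies of port B (definitionally equal to the port)
def pvBin (a : List Int) (k : Int) (i : Nat) (p : Int × Int) (j : Nat) : Int × Int :=
  let s := p.1 + a.getD j 0
  (s, if s ≤ k then max p.2 ((j : Int) - (i : Int) + 1) else p.2)

def pvBstep (a : List Int) (k : Int) (best : Int) (i : Nat) : Int :=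
  ((List.range' i (a.length - i)).foldl (pvBin a k i) (0, best)).2

theorem alt_eq_fold (a : List Int) (k : Int) :
    maxlengthAweSome_alt a k = (List.range a.length).foldl (pvBstep a k) 0 := rfl

theorem pvInner_spec (a : List Int) (k : Int) (i : Nat) :
    ∀ (m j0 : Nat) (best : Int), j0 + m ≤ a.length →
      best ≤ ((List.range' j0 m).foldl (pvBin a k i) (pvS a i j0, best)).2 ∧
      (∀ j, j0 ≤ j → j < j0 + m → pvS a i (j + 1) ≤ k →
        ((j : Int) - i + 1) ≤ ((List.range' j0 m).foldl (pvBin a k i) (pvS a i j0, best)).2) ∧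
      (∀ T : Int, best ≤ T →
        (∀ j, j0 ≤ j → j < j0 + m → pvS a i (j + 1) ≤ k → ((j : Int) - i + 1) ≤ T) →
        ((List.range' j0 m).foldl (pvBin a k i) (pvS a i j0, best)).2 ≤ T) := by
  intro m
  induction m with
  | zero =>
      intro j0 best _
      refine ⟨le_refl _, ?_, ?_⟩
      · intro j h1 h2; omega
      · intro T hT _; simpa using hT
  | succ m ih =>
      intro j0 best hlen
      have hj0 : j0 < a.length := by omega
      set best1 := if pvS a i (j0 + 1) ≤ k then max best ((j0 : Int) - i + 1) else best with hb1
      have hfold : ((List.range' j0 (m + 1)).foldl (pvBin a k i) (pvS a i j0, best)) =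
          ((List.range' (j0 + 1) m).foldl (pvBin a k i) (pvS a i (j0 + 1), best1)) := by
        rw [List.range'_succ, List.foldl_cons]
        have : pvBin a k i (pvS a i j0, best) j0 = (pvS a i (j0 + 1), best1) := by
          simp only [pvBin, hb1, pvS_succ a i j0 hj0]
        rw [this]
      rw [hfold]
      obtain ⟨ih1, ih2, ih3⟩ := ih (j0 + 1) best1 (by omega)
      have hbb1 : best ≤ best1 := by
        rw [hb1]; split
        · exact le_max_left _ _
        · exact le_refl _
      refine ⟨le_trans hbb1 ih1, ?_, ?_⟩
      · intro j h1 h2 hk2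
        rcases Nat.eq_or_lt_of_le h1 with rfl | hlt
        · refine le_trans ?_ ih1
          rw [hb1, if_pos hk2]
          exact le_max_right _ _
        · exact ih2 j hlt (by omega) hk2
      · intro T hT hall
        refine ih3 T ?_ (fun j h1 h2 hk2 => hall j (by omega) (by omega) hk2)
        rw [hb1]; split
        · exact max_le hT (hall j0 (le_refl _) (by omega) (by assumption))
        · exact hT

theorem alt_eq_tgt (a : List Int) (k : Int) : maxlengthAweSome_alt a k = (pvTgt a k : Int) := by
  have hstep : ∀ i best, i < a.length →
      (0 ≤ best ∧ best ≤ (pvTgt a k : Int) ∧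
        ∀ i0 j, i0 < i → i0 ≤ j → j < a.length → pvS a i0 (j + 1) ≤ k →
          ((j : Int) + 1 - i0) ≤ best) →
      (0 ≤ pvBstep a k best i ∧ pvBstep a k best i ≤ (pvTgt a k : Int) ∧
        ∀ i0 j, i0 < i + 1 → i0 ≤ j → j < a.length → pvS a i0 (j + 1) ≤ k →
          ((j : Int) + 1 - i0) ≤ pvBstep a k best i) := by
    intro i best hi ⟨hnn, hub, hlb⟩
    obtain ⟨m1, m2, m3⟩ := pvInner_spec a k i (a.length - i) i best (by omega)
    rw [pvS_self] at m1 m2 m3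
    have hstep_eq : pvBstep a k best i =
        ((List.range' i (a.length - i)).foldl (pvBin a k i) (0, best)).2 := rfl
    rw [hstep_eq]
    refine ⟨le_trans hnn m1, ?_, ?_⟩
    · refine m3 (pvTgt a k : Int) hub ?_
      intro j h1 h2 hk2
      have := pvTgt_ge' a k i j h1 (by omega) hk2
      omega
    · intro i0 j hi0 hij hj hk2
      rcases Nat.lt_or_ge i0 i with hlt | hge
      · exact le_trans (hlb i0 j hlt hij hj hk2) m1
      · have hii : i0 = i := by omega
        subst hii
        have := m2 j hij (by omega) hk2
        omega
  have main := pvFoldlRangeInv (pvBstep a k)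
    (fun i best => 0 ≤ best ∧ best ≤ (pvTgt a k : Int) ∧
      ∀ i0 j, i0 < i → i0 ≤ j → j < a.length → pvS a i0 (j + 1) ≤ k →
        ((j : Int) + 1 - i0) ≤ best)
    a.length 0 ⟨le_refl _, by positivity, by omega⟩ hstep
  obtain ⟨hnn, hub, hlb⟩ := main
  rw [alt_eq_fold]
  refine le_antisymm hub ?_
  rcases pvTgt_attained a k with h0 | ⟨i, j, hij, hj, hk2, heq⟩
  · rw [h0]; exact hnn
  · have := hlb i j (lt_of_le_of_lt hij hj) hij hj hk2
    omega

-- ===== A's phase 1: pvG facts =====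

theorem pvG_bounds (a : List Int) (i : Nat) (h : i < a.length) :
    i ≤ (pvG a i).2 ∧ (pvG a i).2 < a.length := by
  fun_induction pvG a i
  case case1 i h1 p hneg ih =>
    show i ≤ (pvG a (i + 1)).2 ∧ (pvG a (i + 1)).2 < a.length
    obtain ⟨a1, a2⟩ := ih h1
    exact ⟨by omega, a2⟩
  case case2 i h1 p hpos ih =>
    exact ⟨le_refl _, h⟩
  case case3 i h1 =>
    exact ⟨le_refl _, h⟩

theorem pvG_sum (a : List Int) (i : Nat) (h : i < a.length) :
    (pvG a i).1 = pvS a i ((pvG a i).2 + 1) := by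
  fun_induction pvG a i
  case case1 i h1 p hneg ih =>
    have hrec := ih h1
    show a.getD i 0 + (pvG a (i + 1)).1 = pvS a i ((pvG a (i + 1)).2 + 1)
    rw [hrec, ← pvS_trans a i (i + 1) ((pvG a (i + 1)).2 + 1), pvS_succ a i i (by omega),
      pvS_self]
    ring
  case case2 i h1 p hpos ih =>
    show a.getD i 0 = pvS a i (i + 1)
    rw [pvS_succ a i i (by omega), pvS_self]; ring
  case case3 i h1 =>
    show a.getD i 0 = pvS a i (i + 1)
    rw [pvS_succ a i i h, pvS_self]; ring

theorem pvG_min (a : List Int) (i : Nat) (h : i < a.length) :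
    ∀ j, i ≤ j → j < a.length → (pvG a i).1 ≤ pvS a i (j + 1) := by
  have hstepS : ∀ (i' j' : Nat), i' < a.length →
      pvS a i' (j' + 1) = a.getD i' 0 + pvS a (i' + 1) (j' + 1) := by
    intro i' j' hi'
    rw [← pvS_trans a i' (i' + 1) (j' + 1), pvS_succ a i' i' hi', pvS_self]
    ring
  fun_induction pvG a i
  case case1 i h1 p hneg ih =>
    intro j hij hj
    have hneg' : (pvG a (i + 1)).1 < 0 := hneg
    show a.getD i 0 + (pvG a (i + 1)).1 ≤ pvS a i (j + 1)
    rw [hstepS i j (by omega)]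
    rcases Nat.eq_or_lt_of_le hij with rfl | hlt
    · have hii : pvS a (i + 1) (i + 1) = 0 := pvS_self a (i + 1)
      omega
    · have hrec := ih h1 j (by omega) hj
      omega
  case case2 i h1 p hpos ih =>
    intro j hij hj
    have hpos' : ¬ (pvG a (i + 1)).1 < 0 := hpos
    show a.getD i 0 ≤ pvS a i (j + 1)
    rw [hstepS i j (by omega)]
    rcases Nat.eq_or_lt_of_le hij with rfl | hlt
    · rw [pvS_self]; omega
    · have hrec := ih h1 j (by omega) hj
      omega
  case case3 i h1 =>
    intro j hij hj
    have hji : j = i := by omega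
    rw [hji]
    show a.getD i 0 ≤ pvS a i (i + 1)
    rw [pvS_succ a i i h, pvS_self]
    omega

theorem pvAinit_spec (a : List Int) :
    ∀ (c : Nat) (sums : List Int) (ends : PySem.Dict Nat Nat),
      sums.length = a.length → c < a.length →
      (∀ i, c ≤ i → i < a.length →
        sums.getD i 0 = (pvG a i).1 ∧ PySem.Dict.getD ends i 0 = (pvG a i).2) →
      (pvAinit a c (sums, ends)).1.length = a.length ∧
      ∀ i, i < a.length →
        (pvAinit a c (sums, ends)).1.getD i 0 = (pvG a i).1 ∧
        PySem.Dict.getD (pvAinit a c (sums, ends)).2 i 0 = (pvG a i).2 := by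
  intro c
  induction c with
  | zero =>
      intro sums ends hlen _ hinv
      exact ⟨hlen, fun i hi => hinv i (Nat.zero_le i) hi⟩
  | succ c ih =>
      intro sums ends hlen hc1 hinv
      have hclen : c < a.length := by omega
      obtain ⟨hG1, hG2⟩ := hinv (c + 1) (le_refl _) hc1
      have hpvGc : pvG a c =
          if (pvG a (c + 1)).1 < 0 then (a.getD c 0 + (pvG a (c + 1)).1, (pvG a (c + 1)).2)
          else (a.getD c 0, c) := by
        rw [pvG]
        simp [hc1]
      have hstep : pvAinit a (c + 1) (sums, ends) = pvAinit a c
          (if sums.getD (c + 1) 0 < 0 then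
            (sums.set c (a.getD c 0 + sums.getD (c + 1) 0),
             PySem.Dict.insert ends c (PySem.Dict.getD ends (c + 1) 0))
           else (sums.set c (a.getD c 0), PySem.Dict.insert ends c c)) := rfl
      rw [hstep]
      split
      case isTrue hlt =>
        apply ih
        · simpa using hlen
        · exact hclen
        · intro i hci hi
          rcases Nat.eq_or_lt_of_le hci with rfl | hgt
          · have hcl : c < sums.length := by omega
            constructor
            · rw [hpvGc, if_pos (by rw [← hG1]; exact hlt)]
              simp [List.getD_eq_getElem?_getD, hcl]
              rw [← List.getD_eq_getElem?_getD]
              exact hG1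
            · rw [PySem.Dict.getD_insert, if_pos rfl, hpvGc,
                if_pos (by rw [← hG1]; exact hlt), hG2]
          · have hne : i ≠ c := by omega
            constructor
            · rw [show (sums.set c (a.getD c 0 + sums.getD (c + 1) 0)).getD i 0
                  = sums.getD i 0 from by
                simp [List.getD_eq_getElem?_getD, Ne.symm hne]]
              exact (hinv i (by omega) hi).1
            · rw [PySem.Dict.getD_insert, if_neg hne]
              exact (hinv i (by omega) hi).2
      case isFalse hge =>
        apply ih
        · simpa using hlen
        · exact hclen
        · intro i hci hi
          rcases Nat.eq_or_lt_of_le hci with rfl | hgt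
          · have hcl : c < sums.length := by omega
            constructor
            · rw [hpvGc, if_neg (by rw [← hG1]; exact hge)]
              simp [List.getD_eq_getElem?_getD, hcl]
            · rw [PySem.Dict.getD_insert, if_pos rfl, hpvGc,
                if_neg (by rw [← hG1]; exact hge)]
          · have hne : i ≠ c := by omega
            constructor
            · rw [show (sums.set c (a.getD c 0)).getD i 0 = sums.getD i 0 from by
                simp [List.getD_eq_getElem?_getD, Ne.symm hne]]
              exact (hinv i (by omega) hi).1
            · rw [PySem.Dict.getD_insert, if_neg hne]
              exact (hinv i (by omega) hi).2

-- ===== A's phase 2: the while loop =====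

theorem pvAwhile_spec (a : List Int) (k : Int) (sums : List Int) (ends : PySem.Dict Nat Nat)
    (hs : ∀ i, i < a.length →
      sums.getD i 0 = (pvG a i).1 ∧ PySem.Dict.getD ends i 0 = (pvG a i).2) :
    ∀ (fuel e : Nat) (s : Int), e ≤ a.length → a.length - e < fuel →
      e ≤ (pvAwhile a k sums ends fuel e s).1 ∧
      (pvAwhile a k sums ends fuel e s).1 ≤ a.length ∧
      (pvAwhile a k sums ends fuel e s).2 = s + pvS a e (pvAwhile a k sums ends fuel e s).1 ∧
      ((pvAwhile a k sums ends fuel e s).1 = e ∨ (pvAwhile a k sums ends fuel e s).2 ≤ k) ∧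
      ¬((pvAwhile a k sums ends fuel e s).1 < a.length ∧
        (pvAwhile a k sums ends fuel e s).2 + sums.getD (pvAwhile a k sums ends fuel e s).1 0 ≤ k) := by
  intro fuel
  induction fuel with
  | zero => intro e s _ hf; omega
  | succ fuel ih =>
      intro e s he hf
      rw [show pvAwhile a k sums ends (fuel + 1) e s =
          (if e < a.length ∧ s + sums.getD e 0 ≤ k then
            pvAwhile a k sums ends fuel (PySem.Dict.getD ends e 0 + 1) (s + sums.getD e 0)
          else (e, s)) from rfl]
      split
      case isFalse hcond =>
        refine ⟨le_refl _, he, by rw [pvS_self]; ring, Or.inl rfl, hcond⟩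
      case isTrue hcond =>
        obtain ⟨helt, hsk⟩ := hcond
        obtain ⟨hsum_e, hend_e⟩ := hs e helt
        obtain ⟨hb1, hb2⟩ := pvG_bounds a e helt
        set e' := PySem.Dict.getD ends e 0 + 1 with he'
        have he'' : e' = (pvG a e).2 + 1 := by rw [he', hend_e]
        have he'le : e' ≤ a.length := by omega
        have he'gt : e < e' := by omega
        have hblock : sums.getD e 0 = pvS a e e' := by
          rw [hsum_e, he'', pvG_sum a e helt]
        obtain ⟨w1, w2, w3, w4, w5⟩ :=
          ih e' (s + sums.getD e 0) he'le (by omega)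
        refine ⟨by omega, w2, ?_, ?_, w5⟩
        · rw [w3, hblock]
          have := pvS_trans a e e' (pvAwhile a k sums ends fuel e' (s + pvS a e e')).1
          omega
        · rcases w4 with weq | wle
          · right
            rw [w3, weq, pvS_self]
            rw [hblock] at hsk
            omega
          · right; exact wle

theorem pvAwhile_reach (a : List Int) (k : Int) (sums : List Int) (ends : PySem.Dict Nat Nat)
    (hs : ∀ i, i < a.length →
      sums.getD i 0 = (pvG a i).1 ∧ PySem.Dict.getD ends i 0 = (pvG a i).2)
    (fuel e : Nat) (s : Int) (he : e ≤ a.length) (hf : a.length - e < fuel)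
    (i : Nat) (hsum : s = pvS a i e) (j : Nat) (hj : j < a.length)
    (hk2 : pvS a i (j + 1) ≤ k) : j + 1 ≤ (pvAwhile a k sums ends fuel e s).1 := by
  obtain ⟨w1, w2, w3, _, w5⟩ := pvAwhile_spec a k sums ends hs fuel e s he hf
  by_contra hcon
  push Not at hcon
  set r := pvAwhile a k sums ends fuel e s with hr
  have hrj : r.1 ≤ j := by omega
  apply w5
  refine ⟨by omega, ?_⟩
  have hrs : r.2 = pvS a i r.1 := by
    rw [w3, hsum, pvS_trans]
  have hmin := pvG_min a r.1 (by omega) j hrj hj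
  have hsr : sums.getD r.1 0 = (pvG a r.1).1 := (hs r.1 (by omega)).1
  have htr := pvS_trans a i r.1 (j + 1)
  rw [hrs, hsr]
  omega

-- ===== A = pvTgt =====

-- named form of the outer fold body of port A (definitionally equal to the port)
def pvAstep (a : List Int) (k : Int) (sums : List Int) (ends : PySem.Dict Nat Nat)
    (acc : Nat × Int × Int) (i : Nat) : Nat × Int × Int :=
  let es := pvAwhile a k sums ends (a.length + 1) acc.1 acc.2.1
  let sumarray := es.2 - (if i < es.1 then a.getD i 0 else 0)
  let res := max acc.2.2 ((es.1 : Int) - (i : Int))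
  (max es.1 (i + 1), sumarray, res)

theorem pvAstep_inv (a : List Int) (k : Int) (sums : List Int) (ends : PySem.Dict Nat Nat)
    (hs : ∀ i, i < a.length →
      sums.getD i 0 = (pvG a i).1 ∧ PySem.Dict.getD ends i 0 = (pvG a i).2)
    (i : Nat) (st : Nat × Int × Int) (hi : i < a.length)
    (h1 : i ≤ st.1) (h2 : st.1 ≤ a.length) (h3 : st.2.1 = pvS a i st.1)
    (h4 : 0 ≤ st.2.2) (h5 : st.2.2 ≤ (pvTgt a k : Int))
    (h6 : st.1 = i ∨ ∃ i0, i0 ≤ i ∧ pvS a i0 st.1 ≤ k)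
    (h7 : ∀ i0 j, i0 < i → i0 ≤ j → j < a.length → pvS a i0 (j + 1) ≤ k →
      ((j : Int) + 1 - i0) ≤ st.2.2) :
    i + 1 ≤ (pvAstep a k sums ends st i).1 ∧ (pvAstep a k sums ends st i).1 ≤ a.length ∧
    (pvAstep a k sums ends st i).2.1 = pvS a (i + 1) (pvAstep a k sums ends st i).1 ∧
    0 ≤ (pvAstep a k sums ends st i).2.2 ∧
    (pvAstep a k sums ends st i).2.2 ≤ (pvTgt a k : Int) ∧
    ((pvAstep a k sums ends st i).1 = i + 1 ∨
      ∃ i0, i0 ≤ i + 1 ∧ pvS a i0 (pvAstep a k sums ends st i).1 ≤ k) ∧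
    (∀ i0 j, i0 < i + 1 → i0 ≤ j → j < a.length → pvS a i0 (j + 1) ≤ k →
      ((j : Int) + 1 - i0) ≤ (pvAstep a k sums ends st i).2.2) := by
  obtain ⟨w1, w2, w3, w4, -⟩ :=
    pvAwhile_spec a k sums ends hs (a.length + 1) st.1 st.2.1 h2 (by omega)
  set r := pvAwhile a k sums ends (a.length + 1) st.1 st.2.1 with hrdef
  have hrs : r.2 = pvS a i r.1 := by
    rw [w3, h3, pvS_trans]
  have hstep : pvAstep a k sums ends st i =
      (max r.1 (i + 1), r.2 - (if i < r.1 then a.getD i 0 else 0),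
        max st.2.2 ((r.1 : Int) - (i : Int))) := rfl
  have hsucc : pvS a i (i + 1) = a.getD i 0 := by
    rw [pvS_succ a i i hi, pvS_self]; ring
  rw [hstep]
  refine ⟨?_, ?_, ?_, ?_, ?_, ?_, ?_⟩
  · show i + 1 ≤ max r.1 (i + 1)
    omega
  · show max r.1 (i + 1) ≤ a.length
    omega
  · show r.2 - (if i < r.1 then a.getD i 0 else 0) = pvS a (i + 1) (max r.1 (i + 1))
    by_cases hlt : i < r.1
    · rw [if_pos hlt, Nat.max_eq_left (by omega : i + 1 ≤ r.1), hrs]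
      have ht := pvS_trans a i (i + 1) r.1
      omega
    · have hri : r.1 = i := by omega
      rw [if_neg hlt, hrs, hri, pvS_self, Nat.max_eq_right (by omega : i ≤ i + 1), pvS_self]
      ring
  · show (0 : Int) ≤ max st.2.2 ((r.1 : Int) - (i : Int))
    have := le_max_left st.2.2 ((r.1 : Int) - (i : Int))
    omega
  · show max st.2.2 ((r.1 : Int) - (i : Int)) ≤ (pvTgt a k : Int)
    refine max_le h5 ?_
    by_cases hri : r.1 ≤ i
    · have h0 : (0 : Int) ≤ (pvTgt a k : Int) := by positivity
      omega
    · push Not at hri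
      rcases w4 with weq | wle
      · rcases h6 with he | ⟨i0, hi0, hky⟩
        · omega
        · have hv := pvTgt_ge' a k i0 (st.1 - 1) (by omega) (by omega)
            (by rw [show st.1 - 1 + 1 = st.1 from by omega]; exact hky)
          omega
      · have hv := pvTgt_ge' a k i (r.1 - 1) (by omega) (by omega)
          (by rw [show r.1 - 1 + 1 = r.1 from by omega, ← hrs]; exact wle)
        omega
  · show max r.1 (i + 1) = i + 1 ∨ ∃ i0, i0 ≤ i + 1 ∧ pvS a i0 (max r.1 (i + 1)) ≤ k
    by_cases hr1 : r.1 ≤ i + 1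
    · exact Or.inl (Nat.max_eq_right hr1)
    · rw [Nat.max_eq_left (by omega)]
      right
      rcases w4 with weq | wle
      · rcases h6 with he | ⟨i0, hi0, hky⟩
        · omega
        · exact ⟨i0, by omega, by rw [← weq] at hky; exact hky⟩
      · exact ⟨i, by omega, by rw [← hrs]; exact wle⟩
  · show ∀ i0 j, i0 < i + 1 → i0 ≤ j → j < a.length → pvS a i0 (j + 1) ≤ k →
      ((j : Int) + 1 - i0) ≤ max st.2.2 ((r.1 : Int) - (i : Int))
    intro i0 j hi0 hij hj hky
    rcases Nat.lt_or_ge i0 i with hlt | hge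
    · exact le_trans (h7 i0 j hlt hij hj hky) (le_max_left _ _)
    · have hii : i0 = i := by omega
      subst hii
      have hreach := pvAwhile_reach a k sums ends hs (a.length + 1) st.1 st.2.1 h2
        (by omega) i0 h3 j hj hky
      rw [← hrdef] at hreach
      have := le_max_right st.2.2 ((r.1 : Int) - (i0 : Int))
      omega

theorem a_eq_tgt (a : List Int) (k : Int) : maxlengthAweSome a k = (pvTgt a k : Int) := by
  by_cases hn : a.length = 0
  · unfold maxlengthAweSome
    rw [if_pos hn]
    have : pvTgt a k = 0 := by simp [pvTgt, hn]
    rw [this]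
    rfl
  · have hn1 : 1 ≤ a.length := by omega
    set sums1 := ((List.range a.length).map (fun _ => (0 : Int))).set (a.length - 1)
      (a.getD (a.length - 1) 0) with hs1
    set ends1 := PySem.Dict.insert (PySem.Dict.empty : PySem.Dict Nat Nat) (a.length - 1)
      (a.length - 1) with he1
    have hGlast : pvG a (a.length - 1) = (a.getD (a.length - 1) 0, a.length - 1) := by
      rw [pvG]
      rw [dif_neg (by omega : ¬ (a.length - 1 + 1 < a.length))]
    have hinit := pvAinit_spec a (a.length - 1) sums1 ends1
      (by simp [hs1]) (by omega)
      (by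
        intro i hge hi
        have hieq : i = a.length - 1 := by omega
        subst hieq
        constructor
        · rw [hs1, hGlast]
          simp [List.getD_eq_getElem?_getD, hi]
        · rw [he1, PySem.Dict.getD_insert, if_pos rfl, hGlast])
    obtain ⟨-, hs⟩ := hinit
    have hA : maxlengthAweSome a k =
        ((List.range a.length).foldl
          (pvAstep a k (pvAinit a (a.length - 1) (sums1, ends1)).1
            (pvAinit a (a.length - 1) (sums1, ends1)).2) (0, 0, 0)).2.2 := by
      unfold maxlengthAweSome
      rw [if_neg hn]
      rfl
    rw [hA]
    set S := (pvAinit a (a.length - 1) (sums1, ends1)).1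
    set E := (pvAinit a (a.length - 1) (sums1, ends1)).2
    have hs' : ∀ i, i < a.length →
        S.getD i 0 = (pvG a i).1 ∧ PySem.Dict.getD E i 0 = (pvG a i).2 := fun i hi => hs i hi
    have main := pvFoldlRangeInv (pvAstep a k S E)
      (fun i st => i ≤ st.1 ∧ st.1 ≤ a.length ∧ st.2.1 = pvS a i st.1 ∧
        0 ≤ st.2.2 ∧ st.2.2 ≤ (pvTgt a k : Int) ∧
        (st.1 = i ∨ ∃ i0, i0 ≤ i ∧ pvS a i0 st.1 ≤ k) ∧
        (∀ i0 j, i0 < i → i0 ≤ j → j < a.length → pvS a i0 (j + 1) ≤ k →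
          ((j : Int) + 1 - i0) ≤ st.2.2))
      a.length (0, 0, 0)
      ⟨le_refl _, by omega, (pvS_self a 0).symm, le_refl _, by positivity, Or.inl rfl,
        by omega⟩
      (by
        intro i st hi hinv
        obtain ⟨h1, h2, h3, h4, h5, h6, h7⟩ := hinv
        exact pvAstep_inv a k S E hs' i st hi h1 h2 h3 h4 h5 h6 h7)
    obtain ⟨-, -, -, m4, m5, -, m7⟩ := main
    refine le_antisymm m5 ?_
    rcases pvTgt_attained a k with h0 | ⟨i, j, hij, hj, hk2, heq⟩
    · rw [h0]; exact m4
    · have := m7 i j (by omega) hij hj hk2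
      omega

-- ===== VERDICT (by name: the statement is the Claim_ definition above) =====
theorem maxlengthAweSome_spec : Claim_equal_maxlengthAweSome := by
  intro array k _
  unfold Spec_maxlengthAweSome
  rw [a_eq_tgt, alt_eq_tgt]
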